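-- pv_equiv track=rewrite | github.com/SorterSon/DSA | Graph/Graph.py | nrst_cell_with1_m2
-- ===== SOURCE A (Python) =====
-- def nrst_cell_with1_m2(matrix):
--     m = len(matrix)
--     n = len(matrix[0])
--     ans = [[-1 for _ in range(len(submatrix))] for submatrix in matrix]
--     queue = []
--     for row in range(m):
--         for col in range(n):
--             if matrix[row][col] == '1':
--                 queue.append([row, col, 0])
--
--     delta_row = [0, -1, 0, 1]
--     delta_col = [-1, 0, 1, 0]
--     while queue != []:
--         curr = queue[0]
--         queue.remove(curr)
--         ans[curr[0]][curr[1]] = curr[2]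
--         for i in range(4):
--             new_row = curr[0] + delta_row[i]
--             new_col = curr[1] + delta_col[i]
--             if new_row >= 0 and new_row < m and new_col >= 0 and new_col < n and ans[new_row][new_col] == -1 and matrix[new_row][new_col] == '0':
--                 queue.append([new_row, new_col, curr[2] + 1])
--                 ans[new_row][new_col] = 1
--     return ans
-- ===== SOURCE B (Python) =====
-- def nrst_cell_with1_m2(matrix):
--     m = len(matrix)
--     n = len(matrix[0])
--     dist = {}
--     frontier = []
--     for r in range(m):
--         for c in range(n):
--             if matrix[r][c] == '1':
--                 dist[(r, c)] = 0
--                 frontier.append((r, c))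
--     d = 0
--     while frontier:
--         d += 1
--         nxt = []
--         for r, c in frontier:
--             for nr, nc in ((r, c - 1), (r - 1, c), (r, c + 1), (r + 1, c)):
--                 if 0 <= nr < m and 0 <= nc < n and (nr, nc) not in dist and matrix[nr][nc] == '0':
--                     dist[(nr, nc)] = d
--                     nxt.append((nr, nc))
--         frontier = nxt
--     return [[dist.get((r, c), -1) for c in range(len(row))] for r, row in enumerate(matrix)]
-- ===== Notes on version B (the rewrite author's own statement) =====
-- stated objective: alternative
-- what changed: Replaces A's single mutable FIFO queue of [row,col,dist] entries (popped with list.remove, distances written into the grid when popped) by a level-synchronous BFS that keeps discovered distances in a hash map keyed by (row,col), expands one whole frontier list per distance level, and assembles the answer grid only at the end with a comprehension over the map.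
import Mathlib
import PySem

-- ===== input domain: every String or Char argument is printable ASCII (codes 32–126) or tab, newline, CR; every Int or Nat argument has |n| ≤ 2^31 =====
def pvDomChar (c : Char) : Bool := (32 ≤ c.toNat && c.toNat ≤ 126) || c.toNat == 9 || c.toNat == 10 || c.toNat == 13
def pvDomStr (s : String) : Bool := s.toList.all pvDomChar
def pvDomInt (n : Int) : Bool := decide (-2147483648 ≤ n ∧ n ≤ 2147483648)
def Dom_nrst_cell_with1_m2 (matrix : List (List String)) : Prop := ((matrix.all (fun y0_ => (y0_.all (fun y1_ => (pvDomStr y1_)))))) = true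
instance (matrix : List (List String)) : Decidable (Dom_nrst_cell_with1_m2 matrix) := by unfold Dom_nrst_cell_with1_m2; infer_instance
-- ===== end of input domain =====

-- B replaces A's single mutable FIFO queue (popped with list.remove, distances written
-- into the grid when popped) by a level-synchronous BFS keeping distances in a dict
-- keyed by (row, col), one frontier list per level, the answer grid assembled only at
-- the end; same return value on Pre_.

-- A-side grid primitives (Python `g[r][c] = v` / `g[r][c]` / `matrix[r][c]`; the reads are
-- exact for in-range indices — out-of-range defaults (-2, "") are never hit inside Pre_,
-- where Python would raise instead).
def pvGW (g : List (List Int)) (r c : Nat) (v : Int) : List (List Int) :=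
  g.modify r (fun row => row.set c v)

def pvGR (g : List (List Int)) (r c : Nat) : Int := (g.getD r []).getD c (-2)

def pvSR (mat : List (List String)) (r c : Nat) : String := (mat.getD r []).getD c ""

-- the four (delta_row, delta_col) pairs of A, in A's order
def pvDirs : List (Int × Int) := [(0, -1), (-1, 0), (0, 1), (1, 0)]

-- number of cells still holding -1 (termination measure for A's loop)
def pvCountNeg (g : List (List Int)) : Nat :=
  (g.map (fun row => (row.filter (fun v => v == -1)).length)).sum

def pvMu {α : Type} (st : List (List Int) × List α) : Nat :=
  st.2.length + 2 * pvCountNeg st.1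

-- == termination lemmas (cited by port A's decreasing_by) ==
lemma pvRowNeg_set_le (l : List Int) (c : Nat) (v : Int) (hv : v ≠ -1) :
    ((l.set c v).filter (fun x => x == -1)).length ≤ (l.filter (fun x => x == -1)).length := by
  induction l generalizing c with
  | nil => simp
  | cons h t ih =>
    cases c with
    | zero =>
      simp only [List.set_cons_zero, List.filter_cons]
      have hvv : (v == -1) = false := by simp [hv]
      by_cases hh : h == -1 <;> simp [hh, hvv]
    | succ c =>
      simp only [List.set_cons_succ, List.filter_cons]
      by_cases hh : h == -1 <;> simp [hh, ih c]

lemma pvRowNeg_set_lt (l : List Int) (c : Nat) (v : Int) (hc : l.getD c (-2) = -1) (hv : v ≠ -1) :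
    ((l.set c v).filter (fun x => x == -1)).length < (l.filter (fun x => x == -1)).length := by
  induction l generalizing c with
  | nil => simp [List.getD] at hc
  | cons h t ih =>
    cases c with
    | zero =>
      simp only [List.getD_cons_zero] at hc
      subst hc
      have hvv : (v == -1) = false := by simp [hv]
      simp only [List.set_cons_zero, List.filter_cons, hvv]
      simp
    | succ c =>
      simp only [List.getD_cons_succ] at hc
      simp only [List.set_cons_succ, List.filter_cons]
      by_cases hh : h == -1 <;> simp [hh, ih c hc]

lemma pvCountNeg_gW_le (g : List (List Int)) (r c : Nat) (v : Int) (hv : v ≠ -1) :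
    pvCountNeg (pvGW g r c v) ≤ pvCountNeg g := by
  induction g generalizing r with
  | nil => simp [pvGW, pvCountNeg]
  | cons row t ih =>
    cases r with
    | zero =>
      simp only [pvGW, List.modify_zero_cons, pvCountNeg, List.map_cons, List.sum_cons]
      exact Nat.add_le_add_right (pvRowNeg_set_le row c v hv) _
    | succ r =>
      have := ih r
      simp only [pvGW, List.modify_succ_cons, pvCountNeg, List.map_cons, List.sum_cons] at this ⊢
      omega

lemma pvCountNeg_gW_lt (g : List (List Int)) (r c : Nat) (v : Int)
    (h : pvGR g r c = -1) (hv : v ≠ -1) :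
    pvCountNeg (pvGW g r c v) < pvCountNeg g := by
  induction g generalizing r with
  | nil => simp [pvGR, List.getD] at h
  | cons row t ih =>
    cases r with
    | zero =>
      simp only [pvGR, List.getD_cons_zero] at h
      simp only [pvGW, List.modify_zero_cons, pvCountNeg, List.map_cons, List.sum_cons]
      exact Nat.add_lt_add_right (pvRowNeg_set_lt row c v h hv) _
    | succ r =>
      simp only [pvGR, List.getD_cons_succ] at h
      have := ih r h
      simp only [pvGW, List.modify_succ_cons, pvCountNeg, List.map_cons, List.sum_cons] at this ⊢
      omega

lemma pvFoldl_mu_le {α σ : Type} (μ : σ → Nat) (f : σ → α → σ)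
    (h : ∀ s a, μ (f s a) ≤ μ s) : ∀ (l : List α) (s : σ), μ (List.foldl f s l) ≤ μ s := by
  intro l
  induction l with
  | nil => intro s; simp
  | cons a l ih => intro s; simpa using (ih (f s a)).trans (h s a)

-- ===== PORT A =====

-- one neighbour check of A's inner `for i in range(4)` body; state = (ans, queue)
def pvDirStepA (mat : List (List String)) (m n : Nat) (r c d : Nat)
    (st : List (List Int) × List (Nat × Nat × Nat)) (dir : Int × Int) :
    List (List Int) × List (Nat × Nat × Nat) :=
  let nr : Int := (r : Int) + dir.1
  let nc : Int := (c : Int) + dir.2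
  if 0 ≤ nr ∧ nr < (m : Int) ∧ 0 ≤ nc ∧ nc < (n : Int) ∧
      pvGR st.1 nr.toNat nc.toNat = -1 ∧ pvSR mat nr.toNat nc.toNat = "0" then
    (pvGW st.1 nr.toNat nc.toNat 1, st.2 ++ [(nr.toNat, nc.toNat, d + 1)])
  else st

lemma pvDirStepA_mu (mat : List (List String)) (m n r c d : Nat)
    (st : List (List Int) × List (Nat × Nat × Nat)) (dir : Int × Int) :
    pvMu (pvDirStepA mat m n r c d st dir) ≤ pvMu st := by
  dsimp only [pvDirStepA]
  split
  · rename_i hg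
    have := pvCountNeg_gW_lt st.1 ((r : Int) + dir.1).toNat ((c : Int) + dir.2).toNat 1
      hg.2.2.2.2.1 (by decide)
    simp only [pvMu, List.length_append, List.length_cons, List.length_nil]
    omega
  · exact le_refl _

-- A's `while queue != []` loop: pop the front entry, write its distance, scan 4 neighbours
def pvLoopA (mat : List (List String)) (m n : Nat)
    (ans : List (List Int)) (q : List (Nat × Nat × Nat)) : List (List Int) :=
  match q with
  | [] => ans
  | (r, c, d) :: rest =>
    let st := pvDirs.foldl (pvDirStepA mat m n r c d) (pvGW ans r c (d : Int), rest)
    pvLoopA mat m n st.1 st.2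
termination_by q.length + 2 * pvCountNeg ans
decreasing_by
  have h1 := pvFoldl_mu_le pvMu (pvDirStepA mat m n r c d)
    (fun s a => pvDirStepA_mu mat m n r c d s a) pvDirs (pvGW ans r c (d : Int), rest)
  have h2 := pvCountNeg_gW_le ans r c (d : Int) (by omega)
  simp only [pvMu] at h1
  simp only [List.length_cons]
  omega

-- A's initial scan of one row r: append [row, col, 0] for each '1'
def pvScanRowA (mat : List (List String)) (n : Nat)
    (q : List (Nat × Nat × Nat)) (r : Nat) : List (Nat × Nat × Nat) :=
  (List.range n).foldl (fun q c => if pvSR mat r c = "1" then q ++ [(r, c, 0)] else q) q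

def nrst_cell_with1_m2 (matrix : List (List String)) : List (List Int) :=
  let m := matrix.length
  let n := (matrix.getD 0 []).length
  let ans := matrix.map (fun row => row.map (fun _ => (-1 : Int)))
  let queue := (List.range m).foldl (pvScanRowA matrix n) []
  pvLoopA matrix m n ans queue

-- ===== PORT B =====

-- B's neighbour tuple ((r, c-1), (r-1, c), (r, c+1), (r+1, c))
def pvNbrs (r c : Nat) : List (Int × Int) :=
  [((r : Int), (c : Int) - 1), ((r : Int) - 1, (c : Int)),
   ((r : Int), (c : Int) + 1), ((r : Int) + 1, (c : Int))]

-- B's inner `if` for one candidate q; state = (dist map, nxt frontier)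
def pvTryB (mat : List (List String)) (m n d : Nat)
    (st : PySem.Dict (Nat × Nat) Int × List (Nat × Nat)) (q : Int × Int) :
    PySem.Dict (Nat × Nat) Int × List (Nat × Nat) :=
  if 0 ≤ q.1 ∧ q.1 < (m : Int) ∧ 0 ≤ q.2 ∧ q.2 < (n : Int) ∧
      st.1.get? (q.1.toNat, q.2.toNat) = none ∧ pvSR mat q.1.toNat q.2.toNat = "0" then
    (st.1.insert (q.1.toNat, q.2.toNat) (d : Int), st.2 ++ [(q.1.toNat, q.2.toNat)])
  else st

-- B's `while frontier:` loop, one recursion step per distance level (the fuel argument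
-- is a totality guard only; the caller passes more fuel than there can be levels)
def pvLoopB (mat : List (List String)) (m n : Nat) :
    Nat → PySem.Dict (Nat × Nat) Int → List (Nat × Nat) → Nat → PySem.Dict (Nat × Nat) Int
  | 0, dist, _, _ => dist
  | fuel + 1, dist, frontier, d =>
    if frontier = [] then dist
    else
      let st := frontier.foldl
        (fun st p => (pvNbrs p.1 p.2).foldl (pvTryB mat m n (d + 1)) st) (dist, [])
      pvLoopB mat m n fuel st.1 st.2 (d + 1)

-- B's final comprehension `[[dist.get((r,c), -1) for c in range(len(row))] for r,row in enumerate(matrix)]`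
def pvAssemble (mat : List (List String)) (dist : PySem.Dict (Nat × Nat) Int) :
    List (List Int) :=
  (PySem.List.enumerate mat).map
    (fun p => (List.range p.2.length).map (fun c => dist.getD (p.1.toNat, c) (-1)))

def nrst_cell_with1_m2_alt (matrix : List (List String)) : List (List Int) :=
  let m := matrix.length
  let n := (matrix.getD 0 []).length
  let init := (List.range m).foldl
    (fun st r => (List.range n).foldl
      (fun st c => if pvSR matrix r c = "1" then (st.1.insert (r, c) 0, st.2 ++ [(r, c)]) else st) st)
    (PySem.Dict.empty, [])
  let dist := pvLoopB matrix m n ((matrix.map List.length).sum + 2) init.1 init.2 0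
  pvAssemble matrix dist

-- ===== PRECONDITION & SPEC =====
-- Pre_ excludes exactly the inputs where Python A raises (IndexError): the empty matrix
-- (matrix[0]) and matrices with some row shorter than row 0 (matrix[row][col], col < n).
def Pre_nrst_cell_with1_m2 (matrix : List (List String)) : Prop :=
  matrix ≠ [] ∧ ∀ row ∈ matrix, (matrix.getD 0 []).length ≤ row.length

instance (matrix : List (List String)) : Decidable (Pre_nrst_cell_with1_m2 matrix) := by
  unfold Pre_nrst_cell_with1_m2; infer_instance

def pvWitness_nrst_cell_with1_m2 : List (List String) := [["1", "0"], ["0", "x"]]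

def Spec_nrst_cell_with1_m2 (matrix : List (List String)) (out : List (List Int)) : Prop := out = nrst_cell_with1_m2_alt matrix
instance (matrix : List (List String)) (out : List (List Int)) : Decidable (Spec_nrst_cell_with1_m2 matrix out) := by unfold Spec_nrst_cell_with1_m2; infer_instance

-- ===== CLAIM (what is proved, stated in full; the proofs are below) =====
def Claim_equal_nrst_cell_with1_m2 : Prop := ∀ (matrix : List (List String)), Dom_nrst_cell_with1_m2 matrix → Pre_nrst_cell_with1_m2 matrix → Spec_nrst_cell_with1_m2 matrix (nrst_cell_with1_m2 matrix)

-- ===== LEMMAS AND PROOFS =====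

-- g has the same row lengths as mat
def pvShape (mat : List (List String)) (g : List (List Int)) : Prop :=
  g.length = mat.length ∧ ∀ r : Nat, (g.getD r []).length = (mat.getD r []).length

-- The coupling invariant between A's state (ans a, queue = layer@d ++ acc@(d+1)) and
-- B's state (dist map, current frontier = layer, partially built next frontier = acc).
def pvInv (mat : List (List String)) (n : Nat) (a : List (List Int))
    (dist : PySem.Dict (Nat × Nat) Int) (layer acc : List (Nat × Nat)) (d : Nat) : Prop :=
  pvShape mat a ∧
  (∀ r c : Nat, r < mat.length → c < (mat.getD r []).length →
    (r, c) ∉ layer → (r, c) ∉ acc →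
    ((pvGR a r c = -1 ∧ dist.get? (r, c) = none) ∨
     (dist.get? (r, c) = some (pvGR a r c) ∧ pvGR a r c ≠ -1))) ∧
  (∀ p ∈ layer, p.1 < mat.length ∧ p.2 < n ∧ dist.get? p = some (d : Int) ∧
    (pvSR mat p.1 p.2 = "1" ∨ pvGR a p.1 p.2 ≠ -1)) ∧
  (∀ p ∈ acc, p.1 < mat.length ∧ p.2 < n ∧ dist.get? p = some ((d : Int) + 1) ∧
    pvGR a p.1 p.2 ≠ -1)

lemma pvSR_bounds (mat : List (List String)) (r c : Nat) (h : pvSR mat r c ≠ "") :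
    r < mat.length ∧ c < (mat.getD r []).length := by
  unfold pvSR at h
  by_cases hr : r < mat.length
  · refine ⟨hr, ?_⟩
    by_cases hc : c < (mat.getD r []).length
    · exact hc
    · exfalso; apply h
      rw [List.getD_eq_getElem?_getD, List.getElem?_eq_none (by omega)]
      rfl
  · exfalso; apply h
    have : mat.getD r [] = ([] : List String) := by
      rw [List.getD_eq_getElem?_getD, List.getElem?_eq_none (by omega)]
      rfl
    rw [this]
    rfl

lemma pvGetD_eq_getElem {α : Type} (l : List α) (r : Nat) (d : α) (hr : r < l.length) :
    l.getD r d = l[r] := by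
  rw [List.getD_eq_getElem?_getD, List.getElem?_eq_getElem hr]
  rfl

lemma pvGR_gW_same (g : List (List Int)) (r c : Nat) (v : Int)
    (hr : r < g.length) (hc : c < (g.getD r []).length) :
    pvGR (pvGW g r c v) r c = v := by
  rw [pvGetD_eq_getElem g r [] hr] at hc
  simp [pvGR, pvGW, List.getD_eq_getElem?_getD, List.getElem?_eq_getElem hr, hc]

lemma pvGR_gW_ne (g : List (List Int)) (r c r' c' : Nat) (v : Int)
    (h : (r', c') ≠ (r, c)) : pvGR (pvGW g r c v) r' c' = pvGR g r' c' := by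
  simp only [pvGR, pvGW, List.getD_eq_getElem?_getD, List.getElem?_modify]
  by_cases hrr : r = r'
  · subst hrr
    have hcc : c ≠ c' := by intro hcc; exact h (by rw [hcc])
    cases hgr : g[r]? with
    | none => rfl
    | some row => simp [hcc]
  · cases hgr : g[r']? with
    | none => rfl
    | some row => simp [hrr]

lemma pvShape_gW (mat : List (List String)) (g : List (List Int)) (r c : Nat) (v : Int)
    (h : pvShape mat g) : pvShape mat (pvGW g r c v) := by
  refine ⟨by simpa [pvGW] using h.1, fun r' => ?_⟩
  rw [← h.2 r']
  simp only [pvGW, List.getD_eq_getElem?_getD, List.getElem?_modify]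
  cases hgr : g[r']? with
  | none => rfl
  | some row =>
    simp only [Option.getD_some]
    by_cases hrr : r = r' <;> simp [hrr]

lemma pvShape_init (mat : List (List String)) :
    pvShape mat (mat.map (fun row => row.map (fun _ => (-1 : Int)))) := by
  refine ⟨by simp, fun r => ?_⟩
  simp only [List.getD_eq_getElem?_getD, List.getElem?_map]
  cases hgr : mat[r]? with
  | none => rfl
  | some row => simp

lemma pvGR_init (mat : List (List String)) (r c : Nat)
    (hr : r < mat.length) (hc : c < (mat.getD r []).length) :
    pvGR (mat.map (fun row => row.map (fun _ => (-1 : Int)))) r c = -1 := by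
  have hr' : r < (mat.map (fun row => row.map (fun _ => (-1 : Int)))).length := by simpa using hr
  unfold pvGR
  rw [pvGetD_eq_getElem _ r [] hr', List.getElem_map]
  have hc' : c < (mat[r].map (fun _ => (-1 : Int))).length := by
    rw [List.length_map]
    rw [pvGetD_eq_getElem mat r [] hr] at hc
    exact hc
  rw [pvGetD_eq_getElem _ c _ hc', List.getElem_map]

lemma pvGR_eq_getElem (g : List (List Int)) (r c : Nat)
    (hr : r < g.length) (hc : c < g[r].length) : pvGR g r c = g[r][c] := by
  unfold pvGR
  rw [pvGetD_eq_getElem g r [] hr, pvGetD_eq_getElem _ c _ hc]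

-- a grid with mat's shape whose cells all equal dist.getD · (-1) is assembled by pvAssemble
lemma pvAssemble_eq (mat : List (List String)) (a : List (List Int))
    (dist : PySem.Dict (Nat × Nat) Int) (hsa : pvShape mat a)
    (h : ∀ r c : Nat, r < mat.length → c < (mat.getD r []).length →
      pvGR a r c = dist.getD (r, c) (-1)) :
    pvAssemble mat dist = a := by
  unfold pvAssemble
  have hlen : (PySem.List.enumerate mat).length = a.length := by
    rw [PySem.List.length_enumerate, hsa.1]
  refine List.ext_getElem (by simp [hlen]) (fun r h1 h2 => ?_)
  have hr : r < mat.length := by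
    simpa [PySem.List.length_enumerate] using (by simpa using h1 : r < (PySem.List.enumerate mat).length)
  rw [List.getElem_map, PySem.List.getElem_enumerate]
  have hrowlen : (mat.getD r []).length = a[r].length := by
    have := hsa.2 r
    rw [pvGetD_eq_getElem a r [] h2] at this
    omega
  have hmr : mat[r].length = a[r].length := by
    rw [← hrowlen, pvGetD_eq_getElem mat r [] hr]
  refine List.ext_getElem (by simpa using hmr) (fun c hc1 hc2 => ?_)
  simp only [List.getElem_map, List.getElem_range]
  have hcm : c < (mat.getD r []).length := by
    rw [pvGetD_eq_getElem mat r [] hr]; simpa using hc1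
  have := h r c hr hcm
  rw [pvGR_eq_getElem a r c h2 hc2] at this
  have ht : ((0 : Int) + (r : Int)).toNat = r := by omega
  rw [ht, ← this]

-- the two discovery guards are equivalent under the invariant
lemma pvInv_guard (mat : List (List String)) (n : Nat) (a : List (List Int))
    (dist : PySem.Dict (Nat × Nat) Int) (layer acc : List (Nat × Nat)) (d : Nat)
    (hn : ∀ row ∈ mat, n ≤ row.length)
    (hInv : pvInv mat n a dist layer acc d) (r c : Nat) (hr : r < mat.length) (hc : c < n) :
    (pvGR a r c = -1 ∧ pvSR mat r c = "0") ↔ (dist.get? (r, c) = none ∧ pvSR mat r c = "0") := by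
  obtain ⟨-, heq, hlay, hacc⟩ := hInv
  have hcm : c < (mat.getD r []).length := by
    have : n ≤ (mat.getD r []).length := by
      apply hn
      rw [pvGetD_eq_getElem mat r [] hr]
      exact List.getElem_mem _
    omega
  by_cases hl : (r, c) ∈ layer
  · obtain ⟨-, -, hg, hd⟩ := hlay (r, c) hl
    constructor
    · rintro ⟨h1, h2⟩
      rcases hd with hd | hd
      · exact absurd (h2.symm.trans hd) (by decide)
      · exact absurd h1 hd
    · rintro ⟨h1, -⟩
      rw [hg] at h1
      simp at h1
  · by_cases ha : (r, c) ∈ acc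
    · obtain ⟨-, -, hg, hd⟩ := hacc (r, c) ha
      constructor
      · rintro ⟨h1, -⟩; exact absurd h1 hd
      · rintro ⟨h1, -⟩
        rw [hg] at h1
        simp at h1
    · rcases heq r c hr hcm hl ha with ⟨h1, h2⟩ | ⟨h1, h2⟩
      · constructor
        · rintro ⟨-, h3⟩; exact ⟨h2, h3⟩
        · rintro ⟨-, h3⟩; exact ⟨h1, h3⟩
      · constructor
        · rintro ⟨h3, -⟩; exact absurd h3 h2
        · rintro ⟨h3, -⟩
          rw [h1] at h3
          simp at h3

-- invariant after both sides record a newly discovered cell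
lemma pvInv_discover (mat : List (List String)) (n : Nat) (a : List (List Int))
    (dist : PySem.Dict (Nat × Nat) Int) (layer acc : List (Nat × Nat)) (d : Nat)
    (hInv : pvInv mat n a dist layer acc d)
    (r c : Nat) (hr : r < mat.length) (hc : c < n)
    (hga : pvGR a r c = -1) (hs : pvSR mat r c = "0") :
    pvInv mat n (pvGW a r c 1) (dist.insert (r, c) ((d : Int) + 1)) layer (acc ++ [(r, c)]) d := by
  obtain ⟨hsa, heq, hlay, hacc⟩ := hInv
  have hrowm : c < (mat.getD r []).length := (pvSR_bounds mat r c (by rw [hs]; decide)).2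
  have hra : r < a.length := by rw [hsa.1]; exact hr
  have hca : c < (a.getD r []).length := by rw [hsa.2 r]; exact hrowm
  have hnl : (r, c) ∉ layer := by
    intro hm
    rcases (hlay (r, c) hm).2.2.2 with h | h
    · exact absurd (hs.symm.trans h) (by decide)
    · exact h hga
  have hna : (r, c) ∉ acc := fun hm => (hacc (r, c) hm).2.2.2 hga
  refine ⟨pvShape_gW _ _ _ _ _ hsa, ?_, ?_, ?_⟩
  · intro r' c' hr' hc' h1 h2
    have hne : (r', c') ≠ (r, c) := by
      intro he; apply h2; rw [he]; exact List.mem_append_right _ (List.mem_singleton.mpr rfl)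
    rw [pvGR_gW_ne _ _ _ _ _ _ hne, PySem.Dict.get?_insert_of_ne _ _ hne]
    exact heq r' c' hr' hc' h1 (fun hm => h2 (List.mem_append_left _ hm))
  · intro p hp
    obtain ⟨h1, h2, h3, h4⟩ := hlay p hp
    have hne : (p.1, p.2) ≠ (r, c) := by
      intro he
      apply hnl
      have : p = (r, c) := by rw [← he]
      rwa [← this]
    rw [pvGR_gW_ne _ _ _ _ _ _ hne]
    refine ⟨h1, h2, ?_, h4⟩
    rw [show p = (p.1, p.2) from rfl, PySem.Dict.get?_insert_of_ne _ _ hne]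
    exact h3
  · intro p hp
    rcases List.mem_append.mp hp with hp | hp
    · obtain ⟨h1, h2, h3, h4⟩ := hacc p hp
      have hne : (p.1, p.2) ≠ (r, c) := by
        intro he
        apply hna
        have : p = (r, c) := by rw [← he]
        rwa [← this]
      rw [pvGR_gW_ne _ _ _ _ _ _ hne]
      refine ⟨h1, h2, ?_, h4⟩
      rw [show p = (p.1, p.2) from rfl, PySem.Dict.get?_insert_of_ne _ _ hne]
      exact h3
    · rw [List.mem_singleton.mp hp]
      refine ⟨hr, hc, ?_, ?_⟩
      · exact PySem.Dict.get?_insert_self _ _ _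
      · rw [pvGR_gW_same a r c _ hra hca]; decide

-- invariant after A pops (r,c) and writes its final distance d
lemma pvInv_pop (mat : List (List String)) (n : Nat) (a : List (List Int))
    (dist : PySem.Dict (Nat × Nat) Int)
    (layer acc : List (Nat × Nat)) (r c : Nat) (d : Nat)
    (hn : ∀ row ∈ mat, n ≤ row.length)
    (hInv : pvInv mat n a dist ((r, c) :: layer) acc d) :
    pvInv mat n (pvGW a r c (d : Int)) dist layer acc d := by
  obtain ⟨hsa, heq, hlay, hacc⟩ := hInv
  obtain ⟨hr, hc, hgd, -⟩ := hlay (r, c) List.mem_cons_self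
  have hrow : n ≤ (mat.getD r []).length := by
    apply hn
    rw [pvGetD_eq_getElem mat r [] hr]
    exact List.getElem_mem _
  have hra : r < a.length := by rw [hsa.1]; exact hr
  have hca : c < (a.getD r []).length := by rw [hsa.2 r]; omega
  refine ⟨pvShape_gW _ _ _ _ _ hsa, ?_, ?_, ?_⟩
  · intro r' c' hr' hc' h1 h2
    by_cases hne : (r', c') = (r, c)
    · obtain ⟨he1, he2⟩ := Prod.mk.injEq .. ▸ hne
      subst he1; subst he2
      refine Or.inr ⟨?_, ?_⟩
      · rw [pvGR_gW_same a r' c' _ hra hca]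
        exact hgd
      · rw [pvGR_gW_same a r' c' _ hra hca]
        omega
    · rw [pvGR_gW_ne _ _ _ _ _ _ hne]
      exact heq r' c' hr' hc' (by simp [h1, hne]) h2
  · intro p hp
    obtain ⟨h1, h2, h3, h4⟩ := hlay p (List.mem_cons_of_mem _ hp)
    by_cases hne : (p.1, p.2) = (r, c)
    · refine ⟨h1, h2, h3, Or.inr ?_⟩
      rw [congrArg Prod.fst hne, congrArg Prod.snd hne, pvGR_gW_same a r c _ hra hca]
      omega
    · rw [pvGR_gW_ne _ _ _ _ _ _ hne]
      exact ⟨h1, h2, h3, h4⟩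
  · intro p hp
    obtain ⟨h1, h2, h3, h4⟩ := hacc p hp
    by_cases hne : (p.1, p.2) = (r, c)
    · refine ⟨h1, h2, h3, ?_⟩
      rw [congrArg Prod.fst hne, congrArg Prod.snd hne, pvGR_gW_same a r c _ hra hca]
      omega
    · rw [pvGR_gW_ne _ _ _ _ _ _ hne]
      exact ⟨h1, h2, h3, h4⟩

-- relabel: a finished round's next frontier becomes the layer of level d+1
lemma pvInv_shift (mat : List (List String)) (n : Nat) (a : List (List Int))
    (dist : PySem.Dict (Nat × Nat) Int)
    (acc : List (Nat × Nat)) (d : Nat) (hInv : pvInv mat n a dist [] acc d) :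
    pvInv mat n a dist acc [] (d + 1) := by
  obtain ⟨hsa, heq, -, hacc⟩ := hInv
  refine ⟨hsa, ?_, ?_, by simp⟩
  · intro r c hr hc h1 h2
    exact heq r c hr hc (by simp) h1
  · intro p hp
    obtain ⟨h1, h2, h3, h4⟩ := hacc p hp
    exact ⟨h1, h2, by rw [h3]; push_cast; ring_nf, Or.inr h4⟩

lemma pvNbrs_eq (r c : Nat) :
    pvNbrs r c = pvDirs.map (fun dir => ((r : Int) + dir.1, (c : Int) + dir.2)) := by
  simp [pvNbrs, pvDirs, sub_eq_add_neg]

-- the 4-direction scans of A and B stay coupled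
lemma pvDirs_sync (mat : List (List String)) (n : Nat)
    (hn : ∀ row ∈ mat, n ≤ row.length) (ds : List (Int × Int)) :
    ∀ (a : List (List Int)) (dist : PySem.Dict (Nat × Nat) Int)
      (layer acc : List (Nat × Nat)) (r c d : Nat),
    pvInv mat n a dist layer acc d →
    ∃ a' dist' acc',
      List.foldl (pvDirStepA mat mat.length n r c d)
          (a, layer.map (fun p => (p.1, p.2, d)) ++ acc.map (fun p => (p.1, p.2, d + 1))) ds
        = (a', layer.map (fun p => (p.1, p.2, d)) ++ acc'.map (fun p => (p.1, p.2, d + 1)))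
      ∧ List.foldl (fun st dir => pvTryB mat mat.length n (d + 1) st
            ((r : Int) + dir.1, (c : Int) + dir.2)) (dist, acc) ds = (dist', acc')
      ∧ pvInv mat n a' dist' layer acc' d
      ∧ pvCountNeg a' + acc'.length ≤ pvCountNeg a + acc.length := by
  induction ds with
  | nil => exact fun a dist layer acc r c d hInv => ⟨a, dist, acc, rfl, rfl, hInv, le_refl _⟩
  | cons dir ds ih =>
    intro a dist layer acc r c d hInv
    simp only [List.foldl_cons]
    dsimp only [pvDirStepA, pvTryB]
    by_cases h : 0 ≤ (r : Int) + dir.1 ∧ (r : Int) + dir.1 < (mat.length : Int) ∧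
        0 ≤ (c : Int) + dir.2 ∧ (c : Int) + dir.2 < (n : Int) ∧
        pvGR a ((r : Int) + dir.1).toNat ((c : Int) + dir.2).toNat = -1 ∧
        pvSR mat ((r : Int) + dir.1).toNat ((c : Int) + dir.2).toNat = "0"
    · obtain ⟨h1, h2, h3, h4, h5, h6⟩ := h
      have hr' : ((r : Int) + dir.1).toNat < mat.length := by omega
      have hc' : ((c : Int) + dir.2).toNat < n := by omega
      have hgB := (pvInv_guard mat n a dist layer acc d hn hInv _ _ hr' hc').mp ⟨h5, h6⟩
      rw [if_pos ⟨h1, h2, h3, h4, h5, h6⟩, if_pos ⟨h1, h2, h3, h4, hgB.1, hgB.2⟩]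
      have hInv2 := pvInv_discover mat n a dist layer acc d hInv _ _ hr' hc' h5 h6
      have hcast : ((d + 1 : Nat) : Int) = (d : Int) + 1 := by push_cast; ring
      rw [hcast]
      obtain ⟨a', dist', acc', e1, e2, hI, hcnt⟩ :=
        ih (pvGW a _ _ 1) (dist.insert (((r : Int) + dir.1).toNat, ((c : Int) + dir.2).toNat) ((d : Int) + 1))
          layer (acc ++ [(((r : Int) + dir.1).toNat, ((c : Int) + dir.2).toNat)]) r c d hInv2
      refine ⟨a', dist', acc', ?_, e2, hI, ?_⟩
      · rw [← e1]
        congr 1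
        simp
      · have hlt := pvCountNeg_gW_lt a _ _ 1 h5 (by decide)
        simp only [List.length_append, List.length_cons, List.length_nil] at hcnt
        omega
    · have hB : ¬(0 ≤ (r : Int) + dir.1 ∧ (r : Int) + dir.1 < (mat.length : Int) ∧
          0 ≤ (c : Int) + dir.2 ∧ (c : Int) + dir.2 < (n : Int) ∧
          dist.get? (((r : Int) + dir.1).toNat, ((c : Int) + dir.2).toNat) = none ∧
          pvSR mat ((r : Int) + dir.1).toNat ((c : Int) + dir.2).toNat = "0") := by
        intro hB'
        have hr' : ((r : Int) + dir.1).toNat < mat.length := by omega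
        have hc' : ((c : Int) + dir.2).toNat < n := by omega
        exact h ⟨hB'.1, hB'.2.1, hB'.2.2.1, hB'.2.2.2.1,
          (pvInv_guard mat n a dist layer acc d hn hInv _ _ hr' hc').mpr
            ⟨hB'.2.2.2.2.1, hB'.2.2.2.2.2⟩⟩
      rw [if_neg h, if_neg hB]
      exact ih a dist layer acc r c d hInv

-- processing one whole frontier layer
lemma pvLayer_sync (mat : List (List String)) (n : Nat)
    (hn : ∀ row ∈ mat, n ≤ row.length) :
    ∀ (layer : List (Nat × Nat)) (a : List (List Int)) (dist : PySem.Dict (Nat × Nat) Int)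
      (acc : List (Nat × Nat)) (d : Nat),
    pvInv mat n a dist layer acc d →
    ∃ a' dist' acc',
      List.foldl (fun st p => (pvNbrs p.1 p.2).foldl (pvTryB mat mat.length n (d + 1)) st)
          (dist, acc) layer = (dist', acc')
      ∧ pvLoopA mat mat.length n a
          (layer.map (fun p => (p.1, p.2, d)) ++ acc.map (fun p => (p.1, p.2, d + 1)))
        = pvLoopA mat mat.length n a' (acc'.map (fun p => (p.1, p.2, d + 1)))
      ∧ pvInv mat n a' dist' [] acc' d
      ∧ pvCountNeg a' + acc'.length ≤ pvCountNeg a + acc.length := by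
  intro layer
  induction layer with
  | nil =>
    intro a dist acc d hInv
    exact ⟨a, dist, acc, rfl, by simp, hInv, le_refl _⟩
  | cons p rest ih =>
    obtain ⟨r, c⟩ := p
    intro a dist acc d hInv
    have hInv1 := pvInv_pop mat n a dist rest acc r c d hn hInv
    obtain ⟨a2, dist2, acc2, eA, eB, hInv2, hcnt2⟩ :=
      pvDirs_sync mat n hn pvDirs (pvGW a r c (d : Int)) dist rest acc r c d hInv1
    obtain ⟨a3, dist3, acc3, eB2, eA2, hInv3, hcnt3⟩ := ih a2 dist2 acc2 d hInv2
    have hle : pvCountNeg (pvGW a r c (d : Int)) ≤ pvCountNeg a :=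
      pvCountNeg_gW_le a r c (d : Int) (by omega)
    refine ⟨a3, dist3, acc3, ?_, ?_, hInv3, by omega⟩
    · rw [List.foldl_cons]
      have hcell : (pvNbrs r c).foldl (pvTryB mat mat.length n (d + 1)) (dist, acc)
          = (dist2, acc2) := by
        rw [pvNbrs_eq, List.foldl_map]
        exact eB
      rw [hcell]
      exact eB2
    · simp only [List.map_cons, List.cons_append]
      rw [pvLoopA]
      rw [eA]
      exact eA2

-- main coupling: A's queue-based loop equals B's fuelled level loop, assembled
lemma pvMain (mat : List (List String)) (n : Nat)
    (hn : ∀ row ∈ mat, n ≤ row.length) :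
    ∀ (k fuel : Nat) (a : List (List Int)) (dist : PySem.Dict (Nat × Nat) Int)
      (layer : List (Nat × Nat)) (d : Nat),
    pvCountNeg a ≤ k → k < fuel → pvInv mat n a dist layer [] d →
    pvLoopA mat mat.length n a (layer.map (fun p => (p.1, p.2, d)))
      = pvAssemble mat (pvLoopB mat mat.length n fuel dist layer d) := by
  intro k
  induction k using Nat.strong_induction_on with
  | _ k ihk =>
    intro fuel a dist layer d hk hfuel hInv
    obtain ⟨f, rfl⟩ : ∃ f, fuel = f + 1 := ⟨fuel - 1, by omega⟩
    have hext : ∀ (a' : List (List Int)) (dist' : PySem.Dict (Nat × Nat) Int) (d' : Nat),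
        pvInv mat n a' dist' [] [] d' → pvAssemble mat dist' = a' := by
      intro a' dist' d' hI
      refine pvAssemble_eq mat a' dist' hI.1 (fun r c hr hc => ?_)
      rcases hI.2.1 r c hr hc (by simp) (by simp) with ⟨h1, h2⟩ | ⟨h1, h2⟩
      · rw [h1, PySem.Dict.getD_of_get?_eq_none _ _ h2]
      · rw [PySem.Dict.getD_of_get?_eq_some _ _ h1]
    cases layer with
    | nil =>
      rw [List.map_nil, pvLoopA, pvLoopB, if_pos rfl]
      exact (hext a dist d hInv).symm
    | cons p rest =>
      obtain ⟨a3, dist3, acc3, eB2, eA2, hInv3, hcnt3⟩ :=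
        pvLayer_sync mat n hn (p :: rest) a dist [] d hInv
      rw [pvLoopB, if_neg (by simp)]
      rw [eB2]
      have hq : (p :: rest).map (fun p => (p.1, p.2, d))
          = (p :: rest).map (fun p => (p.1, p.2, d))
            ++ ([] : List (Nat × Nat)).map (fun p => (p.1, p.2, d + 1)) := by simp
      rw [hq, eA2]
      have hshift := pvInv_shift mat n a3 dist3 acc3 d hInv3
      cases acc3 with
      | nil =>
        rw [List.map_nil, pvLoopA]
        cases f with
        | zero => exact (hext a3 dist3 (d + 1) hshift).symm
        | succ f =>
          rw [pvLoopB, if_pos rfl]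
          exact (hext a3 dist3 (d + 1) hshift).symm
      | cons q qs =>
        have hk1 : 1 ≤ k := by
          simp only [List.length_cons, List.length_nil] at hcnt3
          omega
        apply ihk (k - 1) (by omega)
        · simp only [List.length_cons, List.length_nil] at hcnt3
          omega
        · omega
        · exact hshift

-- the initial scans: invariant over (dist, frontier) while collecting the '1' cells
def pvInvInit (mat : List (List String)) (n : Nat)
    (dist : PySem.Dict (Nat × Nat) Int) (fr : List (Nat × Nat)) : Prop :=
  (∀ p ∈ fr, p.1 < mat.length ∧ p.2 < n ∧ pvSR mat p.1 p.2 = "1" ∧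
    dist.get? p = some 0) ∧
  (∀ k : Nat × Nat, k ∉ fr → dist.get? k = none)

lemma pvInitMark (mat : List (List String)) (n : Nat)
    (dist : PySem.Dict (Nat × Nat) Int) (fr : List (Nat × Nat)) (r c : Nat)
    (hc : c < n) (hs : pvSR mat r c = "1") (hI : pvInvInit mat n dist fr) :
    pvInvInit mat n (dist.insert (r, c) 0) (fr ++ [(r, c)]) := by
  obtain ⟨h1, h2⟩ := hI
  have hr : r < mat.length := (pvSR_bounds mat r c (by rw [hs]; decide)).1
  constructor
  · intro p hp
    rcases List.mem_append.mp hp with hp | hp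
    · obtain ⟨g1, g2, g3, g4⟩ := h1 p hp
      refine ⟨g1, g2, g3, ?_⟩
      by_cases hne : p = (r, c)
      · rw [hne, PySem.Dict.get?_insert_self]
      · rw [show p = (p.1, p.2) from rfl] at hne ⊢
        rw [PySem.Dict.get?_insert_of_ne _ _ hne]
        exact g4
    · rw [List.mem_singleton.mp hp]
      exact ⟨hr, hc, hs, PySem.Dict.get?_insert_self _ _ _⟩
  · intro k hk
    have hk1 : k ∉ fr := fun hm => hk (List.mem_append_left _ hm)
    have hk2 : k ≠ (r, c) := by
      intro he; apply hk; rw [he]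
      exact List.mem_append_right _ (List.mem_singleton.mpr rfl)
    rw [show k = (k.1, k.2) from rfl] at hk2 ⊢
    rw [PySem.Dict.get?_insert_of_ne _ _ hk2]
    exact h2 k hk1

-- one row of the two initial scans
lemma pvScanRow_sync (mat : List (List String)) (n r : Nat) :
    ∀ (cs : List Nat) (dist : PySem.Dict (Nat × Nat) Int) (fr : List (Nat × Nat)),
    (∀ c ∈ cs, c < n) → pvInvInit mat n dist fr →
    ∃ dist' fr',
      List.foldl (fun st c => if pvSR mat r c = "1"
          then (st.1.insert (r, c) 0, st.2 ++ [(r, c)]) else st) (dist, fr) cs = (dist', fr')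
      ∧ List.foldl (fun q c => if pvSR mat r c = "1" then q ++ [(r, c, 0)] else q)
          (fr.map (fun p => (p.1, p.2, 0))) cs = fr'.map (fun p => (p.1, p.2, 0))
      ∧ pvInvInit mat n dist' fr' := by
  intro cs
  induction cs with
  | nil => exact fun dist fr _ hI => ⟨dist, fr, rfl, rfl, hI⟩
  | cons c cs ih =>
    intro dist fr hcs hI
    simp only [List.foldl_cons]
    by_cases hs : pvSR mat r c = "1"
    · rw [if_pos hs, if_pos hs]
      have hI2 := pvInitMark mat n dist fr r c (hcs c List.mem_cons_self) hs hI
      obtain ⟨dist', fr', e1, e2, hI'⟩ :=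
        ih (dist.insert (r, c) 0) (fr ++ [(r, c)])
          (fun c hc => hcs c (List.mem_cons_of_mem _ hc)) hI2
      refine ⟨dist', fr', e1, ?_, hI'⟩
      rw [← e2]
      congr 1
      simp
    · rw [if_neg hs, if_neg hs]
      exact ih dist fr (fun c hc => hcs c (List.mem_cons_of_mem _ hc)) hI

-- the whole initial scans stay coupled
lemma pvInit_sync (mat : List (List String)) (n : Nat) :
    ∀ (rs : List Nat) (dist : PySem.Dict (Nat × Nat) Int) (fr : List (Nat × Nat)),
    pvInvInit mat n dist fr →
    ∃ dist' fr',
      List.foldl (fun st r => (List.range n).foldl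
          (fun st c => if pvSR mat r c = "1"
            then (st.1.insert (r, c) 0, st.2 ++ [(r, c)]) else st) st) (dist, fr) rs
        = (dist', fr')
      ∧ List.foldl (pvScanRowA mat n) (fr.map (fun p => (p.1, p.2, 0))) rs
          = fr'.map (fun p => (p.1, p.2, 0))
      ∧ pvInvInit mat n dist' fr' := by
  intro rs
  induction rs with
  | nil => exact fun dist fr hI => ⟨dist, fr, rfl, rfl, hI⟩
  | cons r rs ih =>
    intro dist fr hI
    simp only [List.foldl_cons]
    obtain ⟨dist2, fr2, e1, e2, hI2⟩ :=
      pvScanRow_sync mat n r (List.range n) dist fr (fun c hc => List.mem_range.mp hc) hI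
    rw [e1, show pvScanRowA mat n (fr.map (fun p => (p.1, p.2, 0))) r
        = fr2.map (fun p => (p.1, p.2, 0)) from e2]
    exact ih dist2 fr2 hI2

-- the all-(-1) grid has as many -1 cells as mat has cells
lemma pvCountNeg_init (mat : List (List String)) :
    pvCountNeg (mat.map (fun row => row.map (fun _ => (-1 : Int)))) = (mat.map List.length).sum := by
  unfold pvCountNeg
  rw [List.map_map]
  congr 1
  refine List.map_congr_left (fun row _ => ?_)
  simp [List.filter_eq_self.mpr]

-- ===== VERDICT (by name: the statement is the Claim_ definition above) =====
theorem nrst_cell_with1_m2_spec : Claim_equal_nrst_cell_with1_m2 := by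
  intro matrix hDom hPre
  unfold Spec_nrst_cell_with1_m2 nrst_cell_with1_m2 nrst_cell_with1_m2_alt
  dsimp only
  have hn : ∀ row ∈ matrix, (matrix.getD 0 []).length ≤ row.length := hPre.2
  have hI0 : pvInvInit matrix (matrix.getD 0 []).length PySem.Dict.empty [] :=
    ⟨by simp, fun k _ => PySem.Dict.get?_empty k⟩
  obtain ⟨dist0, fr0, eS, eQ, hI1⟩ :=
    pvInit_sync matrix (matrix.getD 0 []).length (List.range matrix.length)
      PySem.Dict.empty [] hI0
  simp only [List.map_nil] at eQ
  rw [eS, eQ]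
  have hInv1 : pvInv matrix (matrix.getD 0 []).length
      (matrix.map (fun row => row.map (fun _ => (-1 : Int)))) dist0 fr0 [] 0 := by
    refine ⟨pvShape_init matrix, ?_, ?_, by simp⟩
    · intro r c hr hc h1 _
      exact Or.inl ⟨pvGR_init matrix r c hr hc, hI1.2 (r, c) h1⟩
    · intro p hp
      obtain ⟨g1, g2, g3, g4⟩ := hI1.1 p hp
      exact ⟨g1, g2, by rw [g4]; norm_num, Or.inl g3⟩
  rw [← pvMain matrix (matrix.getD 0 []).length hn
      ((matrix.map List.length).sum + 1) ((matrix.map List.length).sum + 2)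
      (matrix.map (fun row => row.map (fun _ => (-1 : Int)))) dist0 fr0 0
      (by rw [pvCountNeg_init]; omega) (by omega) hInv1]
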